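-- pv_equiv track=rewrite | github.com/Dvarkian/Tom-the-AI | responses/trivia/__init__.py | filter_line
-- ===== SOURCE A (Python) =====
-- def filter_line(line):
--     count=0
--     ignore=False
--     result=[]
--     for c in line:
--         if c==">" and count==1:
--             count=0
--             ignore=False
--         if not ignore:
--             result.append(c)
--         if c=="<" and count==0:
--             ignore=True
--             count=1
--     return "".join(result)
-- ===== SOURCE B (Python) =====
-- def filter_line(line):
--     out = []
--     it = iter(line)
--     for c in it:
--         out.append(c)
--         if c == '<':
--             for d in it:
--                 if d == '>':
--                     out.append(d)
--                     break
--     return ''.join(out)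
-- ===== Notes on version B (the rewrite author's own statement) =====
-- stated objective: simpler
-- what changed: Replaced the count/ignore boolean-flag state machine with a two-mode nested-iterator pass: copy characters, and on '<' consume from the same iterator until the matching '>' (kept), with no flags or counters.
import Mathlib
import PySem

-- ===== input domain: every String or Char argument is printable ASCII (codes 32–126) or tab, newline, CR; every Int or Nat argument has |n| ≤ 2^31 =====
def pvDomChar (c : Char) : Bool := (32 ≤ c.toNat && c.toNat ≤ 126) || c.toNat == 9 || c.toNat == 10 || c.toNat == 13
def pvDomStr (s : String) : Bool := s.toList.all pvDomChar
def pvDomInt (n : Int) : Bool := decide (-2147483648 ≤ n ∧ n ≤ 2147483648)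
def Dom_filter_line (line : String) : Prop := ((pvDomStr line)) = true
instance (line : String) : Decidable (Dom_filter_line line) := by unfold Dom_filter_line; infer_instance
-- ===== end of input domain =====

-- B replaces A's count/ignore flag machine by a two-mode copy/skip recursion (simpler decomposition, same O(n) cost).

-- ===== PORT A =====
-- one iteration of A's for-loop over state (count, ignore, result)
def stepA (s : Int × Bool × List Char) (c : Char) : Int × Bool × List Char :=
  let count := s.1
  let ignore := s.2.1
  let result := s.2.2
  let p := if c = '>' ∧ count = 1 then ((0 : Int), false) else (count, ignore)
  let result := if ¬ p.2 then result ++ [c] else result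
  let q := if c = '<' ∧ p.1 = 0 then ((1 : Int), true) else p
  (q.1, q.2, result)

def filter_line (line : String) : String :=
  String.mk (line.toList.foldl stepA (0, false, [])).2.2

-- ===== PORT B =====
-- copy mode / skip mode of Source B's outer and inner loop over the shared iterator
mutual
def bCopy : List Char → List Char
  | [] => []
  | c :: rest => if c = '<' then c :: bSkip rest else c :: bCopy rest
def bSkip : List Char → List Char
  | [] => []
  | c :: rest => if c = '>' then c :: bCopy rest else bSkip rest
end

def filter_line_alt (line : String) : String :=
  String.mk (bCopy line.toList)

-- ===== PRECONDITION & SPEC =====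
def Spec_filter_line (line : String) (out : String) : Prop := out = filter_line_alt line
instance (line : String) (out : String) : Decidable (Spec_filter_line line out) := by unfold Spec_filter_line; infer_instance

-- ===== CLAIM (what is proved, stated in full; the proofs are below) =====
def Claim_equal_filter_line : Prop := ∀ (line : String), Dom_filter_line line → Spec_filter_line line (filter_line line)

-- ===== LEMMAS AND PROOFS =====
lemma foldl_stepA_modes (l : List Char) : ∀ res : List Char,
    (List.foldl stepA (0, false, res) l).2.2 = res ++ bCopy l ∧
    (List.foldl stepA (1, true, res) l).2.2 = res ++ bSkip l := by
  induction l with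
  | nil => intro res; simp [bCopy, bSkip]
  | cons c rest ih =>
    intro res
    constructor
    · by_cases h : c = '<'
      · subst h
        simpa [stepA, bCopy] using (ih (res ++ ['<'])).2
      · simpa [stepA, bCopy, h] using (ih (res ++ [c])).1
    · by_cases h : c = '>'
      · subst h
        simpa [stepA, bSkip] using (ih (res ++ ['>'])).1
      · simpa [stepA, bSkip, h] using (ih res).2

-- ===== VERDICT (by name: the statement is the Claim_ definition above) =====
theorem filter_line_spec : Claim_equal_filter_line := by
  intro line _
  unfold Spec_filter_line filter_line filter_line_alt
  rw [(foldl_stepA_modes line.toList []).1]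
  simp
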